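-- pv_equiv track=rewrite | github.com/johnynek/bosatsu | pyout/Bosatsu/Properties.py | ___t14
-- ===== SOURCE A (Python) =====
-- def ___t14(___ba1):
--     ___bi2 = ___ba1[0]
--     ___bk0 = ___ba1[1]
--     ___bistr1 = ___bi2.__str__()
--     ___bkstr0 = ___bk0.__str__()
--     ___bresult0 = (___bi2 << ___bk0) >> ___bk0
--     ___t15 = []
--     ___t16 = (1,
--         "(",
--         (1,
--             ___bistr1,
--             (1,
--                 " << ",
--                 (1,
--                     ___bkstr0,
--                     (1,
--                         ") >> ",
--                         (1,
--                             ___bkstr0,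
--                             (1,
--                                 " == ",
--                                 (1,
--                                     ___bistr1,
--                                     (1, ", got: ", (1, ___bresult0.__str__(), (0,)))))))))))
--     while ___t16[0] != 0:
--         ___t15.append(___t16[1])
--         ___t16 = ___t16[2]
--     return (0, ___bresult0 == ___bi2, "".join(___t15))
-- ===== SOURCE B (Python) =====
-- def ___t14(___ba1):
--     i, k = ___ba1
--     result = (i << k) >> k
--     msg = "(" + str(i) + " << " + str(k) + ") >> " + str(k) + " == " + str(i) + ", got: " + str(result)
--     return (0, result == i, msg)
-- ===== Notes on version B (the rewrite author's own statement) =====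
-- stated objective: simpler
-- what changed: B builds the message by direct string concatenation instead of constructing a nested cons-tuple list and walking it with a while loop to collect fragments.
import Mathlib
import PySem

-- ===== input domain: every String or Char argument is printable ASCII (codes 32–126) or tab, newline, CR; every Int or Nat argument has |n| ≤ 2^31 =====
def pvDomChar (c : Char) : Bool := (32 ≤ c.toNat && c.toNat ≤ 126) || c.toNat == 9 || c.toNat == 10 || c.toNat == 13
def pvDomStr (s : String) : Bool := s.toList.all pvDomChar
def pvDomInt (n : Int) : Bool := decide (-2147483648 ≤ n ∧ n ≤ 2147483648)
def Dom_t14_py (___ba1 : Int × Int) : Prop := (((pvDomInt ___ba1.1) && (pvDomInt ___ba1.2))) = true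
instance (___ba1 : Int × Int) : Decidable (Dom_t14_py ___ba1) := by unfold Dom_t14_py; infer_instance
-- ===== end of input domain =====

-- B builds the message by direct string concatenation instead of a nested cons-tuple list walked by a while loop; objective: simpler.

-- ===== PORT A =====
-- the nested tuples (1, s, rest) / (0,) of A, as an explicit cons list of fragments
inductive PvFrag : Type
  | nil : PvFrag
  | cons : String → PvFrag → PvFrag
deriving DecidableEq, Repr

-- the while loop: append t16[1] to t15 until tag 0
def pvCollect (t15 : List String) : PvFrag → List String
  | PvFrag.nil => t15
  | PvFrag.cons s rest => pvCollect (t15 ++ [s]) rest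

def t14_py (___ba1 : Int × Int) : Int × Bool × String :=
  let ___bi2 := ___ba1.1
  let ___bk0 := ___ba1.2
  let ___bistr1 := PySem.Int.toStr ___bi2
  let ___bkstr0 := PySem.Int.toStr ___bk0
  let ___bresult0 := (___bi2 <<< ___bk0.toNat) >>> ___bk0.toNat
  let ___t15 : List String := []
  let ___t16 : PvFrag :=
    PvFrag.cons "(" (PvFrag.cons ___bistr1 (PvFrag.cons " << " (PvFrag.cons ___bkstr0
      (PvFrag.cons ") >> " (PvFrag.cons ___bkstr0 (PvFrag.cons " == " (PvFrag.cons ___bistr1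
        (PvFrag.cons ", got: " (PvFrag.cons (PySem.Int.toStr ___bresult0) PvFrag.nil)))))))))
  (0, ___bresult0 == ___bi2, PySem.Str.join "" (pvCollect ___t15 ___t16))

-- ===== PORT B =====
def t14_py_alt (___ba1 : Int × Int) : Int × Bool × String :=
  let i := ___ba1.1
  let k := ___ba1.2
  let result := (i <<< k.toNat) >>> k.toNat
  let msg := "(" ++ PySem.Int.toStr i ++ " << " ++ PySem.Int.toStr k ++ ") >> " ++
    PySem.Int.toStr k ++ " == " ++ PySem.Int.toStr i ++ ", got: " ++ PySem.Int.toStr result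
  (0, result == i, msg)

-- ===== PRECONDITION & SPEC =====
-- Python raises ValueError ("negative shift count") when the shift amount is negative; B raises there too.
def Pre_t14_py (___ba1 : Int × Int) : Prop := 0 ≤ ___ba1.2
instance (___ba1 : Int × Int) : Decidable (Pre_t14_py ___ba1) := by unfold Pre_t14_py; infer_instance
def pvWitness_t14_py : (Int × Int) := (5, 3)
def Spec_t14_py (___ba1 : Int × Int) (out : Int × Bool × String) : Prop := out = t14_py_alt ___ba1
instance (___ba1 : Int × Int) (out : Int × Bool × String) : Decidable (Spec_t14_py ___ba1 out) := by unfold Spec_t14_py; infer_instance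

-- ===== CLAIM (what is proved, stated in full; the proofs are below) =====
def Claim_equal_t14_py : Prop := ∀ (___ba1 : Int × Int), Dom_t14_py ___ba1 → Pre_t14_py ___ba1 → Spec_t14_py ___ba1 (t14_py ___ba1)

-- ===== LEMMAS AND PROOFS =====
theorem pv_join_concat (s1 s2 s3 s4 s5 s6 s7 s8 s9 s10 : String) :
    PySem.Str.join "" [s1, s2, s3, s4, s5, s6, s7, s8, s9, s10] =
      s1 ++ s2 ++ s3 ++ s4 ++ s5 ++ s6 ++ s7 ++ s8 ++ s9 ++ s10 := by
  apply String.ext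
  simp [PySem.Str.toList_join, PySem.Chars.join, List.intercalate, List.intersperse]

-- ===== VERDICT (by name: the statement is the Claim_ definition above) =====
theorem t14_py_spec : Claim_equal_t14_py := by
  intro ba _ _
  unfold Spec_t14_py t14_py t14_py_alt
  simp only [pvCollect, List.nil_append, List.cons_append]
  rw [pv_join_concat]
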